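-- pv_equiv track=rewrite | github.com/YoussefTrabelsi1/Leetcode_solutions | Python/Best Time to Buy and Sell Stock using Strategy/max_profit_bruteforce.py | maximumProfit
-- ===== SOURCE A (Python) =====
-- from typing import List
--
-- def maximumProfit(prices: List[int], strategy: List[int], k: int) -> int:
--     n = len(prices)
--     h = k // 2
--
--     base = 0
--     for p, s in zip(prices, strategy):
--         base += p * s
--
--     best = base  # allow "no modification"
--
--     # O(n*k) brute force over all windows
--     for l in range(n - k + 1):
--         sumA = 0  # sum of original contributions in the window
--         sumP_second = 0  # sum of prices in the last half (which becomes all sells)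
--         for i in range(l, l + k):
--             sumA += strategy[i] * prices[i]
--             if i >= l + h:
--                 sumP_second += prices[i]
--         delta = sumP_second - sumA
--         best = max(best, base + delta)
--
--     return best
-- ===== SOURCE B (Python) =====
-- from typing import List
--
-- def maximumProfit(prices: List[int], strategy: List[int], k: int) -> int:
--     # Prefix sums: each window's delta is evaluated in O(1), O(n) total.
--     pa = [0]  # prefix sums of strategy[i]*prices[i]
--     pp = [0]  # prefix sums of prices[i]
--     a = 0
--     p = 0
--     for price, s in zip(prices, strategy):
--         a += price * s
--         p += price
--         pa.append(a)
--         pp.append(p)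
--     base = a
--     n = len(prices)
--     if k <= 0 or k > n:
--         return base
--     h = k // 2
--     best = base
--     for l in range(n - k + 1):
--         delta = (pp[l + k] - pp[l + h]) - (pa[l + k] - pa[l])
--         if base + delta > best:
--             best = base + delta
--     return best
-- ===== Notes on version B (the rewrite author's own statement) =====
-- stated objective: faster
-- what changed: B precomputes prefix sums of prices and of price*strategy in one pass and evaluates each window's delta in O(1) from four prefix lookups, replacing A's inner O(k) rescan of every window.
import Mathlib
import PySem

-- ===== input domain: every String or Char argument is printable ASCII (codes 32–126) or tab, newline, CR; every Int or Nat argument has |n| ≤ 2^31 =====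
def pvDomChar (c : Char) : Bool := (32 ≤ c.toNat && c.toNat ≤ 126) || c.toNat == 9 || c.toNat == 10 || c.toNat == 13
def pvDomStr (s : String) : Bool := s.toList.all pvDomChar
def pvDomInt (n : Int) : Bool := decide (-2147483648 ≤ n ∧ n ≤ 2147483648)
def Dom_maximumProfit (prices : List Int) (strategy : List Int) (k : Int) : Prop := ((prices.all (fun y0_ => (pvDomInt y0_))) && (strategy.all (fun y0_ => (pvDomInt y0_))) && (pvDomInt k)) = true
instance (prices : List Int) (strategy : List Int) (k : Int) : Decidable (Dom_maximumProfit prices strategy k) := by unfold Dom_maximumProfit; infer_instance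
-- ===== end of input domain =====

-- B replaces A's per-window rescan by one prefix-sum pass with O(1) window evaluation (measurably faster).

-- ===== PORT A =====
-- step of A's inner 'for i in range(l, l+k)' loop; lh = l + h
def aInner (strategy prices : List Int) (lh : Int) (st : Int × Int) (i : Int) : Int × Int :=
  (st.1 + PySem.List.pyGetD strategy i 0 * PySem.List.pyGetD prices i 0,
   if lh ≤ i then st.2 + PySem.List.pyGetD prices i 0 else st.2)

def maximumProfit (prices : List Int) (strategy : List Int) (k : Int) : Int :=
  let n : Int := prices.length
  let h : Int := PySem.Int.floordiv k 2
  let base : Int := (List.zip prices strategy).foldl (fun b ps => b + ps.1 * ps.2) 0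
  (PySem.List.pyRange 0 (n - k + 1)).foldl (fun best l =>
    let s := (PySem.List.pyRange l (l + k)).foldl (aInner strategy prices (l + h)) (0, 0)
    max best (base + (s.2 - s.1))) base

-- ===== PORT B =====
-- step of B's prefix-building loop: state = ((pa, pp), (a, p))
def bStep (st : (List Int × List Int) × (Int × Int)) (ps : Int × Int) : (List Int × List Int) × (Int × Int) :=
  let a := st.2.1 + ps.1 * ps.2
  let p := st.2.2 + ps.1
  ((st.1.1 ++ [a], st.1.2 ++ [p]), (a, p))

def maximumProfit_alt (prices : List Int) (strategy : List Int) (k : Int) : Int :=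
  let st := (List.zip prices strategy).foldl bStep (([0], [0]), (0, 0))
  let pa := st.1.1
  let pp := st.1.2
  let base := st.2.1
  let n : Int := prices.length
  if k ≤ 0 ∨ n < k then base
  else
    let h : Int := PySem.Int.floordiv k 2
    (PySem.List.pyRange 0 (n - k + 1)).foldl (fun best l =>
      let delta := (PySem.List.pyGetD pp (l + k) 0 - PySem.List.pyGetD pp (l + h) 0)
                 - (PySem.List.pyGetD pa (l + k) 0 - PySem.List.pyGetD pa l 0)
      if best < base + delta then base + delta else best) base

-- ===== PRECONDITION & SPEC =====
-- Pre_ excludes exactly the inputs where A raises IndexError: 0 < k ≤ len(prices) while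
-- strategy is shorter than prices (the window scan indexes strategy[i] for i up to n-1).
def Pre_maximumProfit (prices : List Int) (strategy : List Int) (k : Int) : Prop :=
  k ≤ 0 ∨ (prices.length : Int) < k ∨ prices.length ≤ strategy.length
instance (prices : List Int) (strategy : List Int) (k : Int) : Decidable (Pre_maximumProfit prices strategy k) := by unfold Pre_maximumProfit; infer_instance
def pvWitness_maximumProfit : List Int × List Int × Int := ([4, 2, 8, 5], [0, 1, -1, 1], 2)

def Spec_maximumProfit (prices : List Int) (strategy : List Int) (k : Int) (out : Int) : Prop := out = maximumProfit_alt prices strategy k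
instance (prices : List Int) (strategy : List Int) (k : Int) (out : Int) : Decidable (Spec_maximumProfit prices strategy k out) := by unfold Spec_maximumProfit; infer_instance

-- ===== CLAIM (what is proved, stated in full; the proofs are below) =====
def Claim_equal_maximumProfit : Prop := ∀ (prices : List Int) (strategy : List Int) (k : Int), Dom_maximumProfit prices strategy k → Pre_maximumProfit prices strategy k → Spec_maximumProfit prices strategy k (maximumProfit prices strategy k)

-- ===== LEMMAS AND PROOFS =====

-- A's base loop is the sum of the products
lemma foldl_base (xs : List (Int × Int)) (c : Int) :
    xs.foldl (fun b ps => b + ps.1 * ps.2) c = c + (xs.map (fun ps => ps.1 * ps.2)).sum := by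
  induction xs generalizing c with
  | nil => simp
  | cons x xs ih => simp only [List.foldl_cons, ih, List.map_cons, List.sum_cons]; ring

-- B's prefix-building loop, fully characterised
lemma bStep_spec (xs : List (Int × Int)) (accA accP : List Int) (a p : Int) :
    xs.foldl bStep ((accA, accP), (a, p))
      = ((accA ++ (List.range xs.length).map (fun i => a + ((xs.take (i+1)).map (fun ps => ps.1 * ps.2)).sum),
          accP ++ (List.range xs.length).map (fun i => p + ((xs.take (i+1)).map Prod.fst).sum)),
         (a + (xs.map (fun ps => ps.1 * ps.2)).sum, p + (xs.map Prod.fst).sum)) := by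
  induction xs generalizing accA accP a p with
  | nil => simp
  | cons x xs ih =>
    simp only [List.foldl_cons, bStep, List.length_cons, ih]
    have m1 : (List.range (xs.length + 1)).map (fun i => a + (((x :: xs).take (i+1)).map (fun ps => ps.1 * ps.2)).sum)
        = (a + x.1 * x.2) :: (List.range xs.length).map (fun i => (a + x.1 * x.2) + ((xs.take (i+1)).map (fun ps => ps.1 * ps.2)).sum) := by
      rw [List.range_succ_eq_map, List.map_cons, List.map_map]
      refine congrArg₂ _ (by simp) (List.map_congr_left (fun i _ => ?_))
      simp [List.take_succ_cons]
      ring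
    have m2 : (List.range (xs.length + 1)).map (fun i => p + (((x :: xs).take (i+1)).map Prod.fst).sum)
        = (p + x.1) :: (List.range xs.length).map (fun i => (p + x.1) + ((xs.take (i+1)).map Prod.fst).sum) := by
      rw [List.range_succ_eq_map, List.map_cons, List.map_map]
      refine congrArg₂ _ (by simp) (List.map_congr_left (fun i _ => ?_))
      simp [List.take_succ_cons]
      ring
    rw [m1, m2]
    simp only [List.map_cons, List.sum_cons, List.append_assoc, List.singleton_append]
    refine Prod.ext (Prod.ext rfl rfl) (Prod.ext (by simp; ring) (by simp; ring))

-- the built prefix list is the map of take-sums over range (len+1)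
lemma pref_list_eq (xs : List Int) (len : Nat) (h : xs.length = len) :
    (0 : Int) :: (List.range len).map (fun i => ((xs.take (i+1)).sum))
      = (List.range (len+1)).map (fun i => (xs.take i).sum) := by
  subst h
  rw [List.range_succ_eq_map, List.map_cons, List.map_map]
  simp [Function.comp_def]

-- sum over a shifted range of lookups = difference of prefix sums
lemma sum_map_getD (xs : List Int) (l : Int) (t : Nat) (hl : 0 ≤ l)
    (hb : l.toNat + t ≤ xs.length) :
    ((List.range t).map (fun (j : Nat) => PySem.List.pyGetD xs (l + (j : Int)) 0)).sum
      = (xs.take (l.toNat + t)).sum - (xs.take l.toNat).sum := by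
  induction t with
  | zero => simp
  | succ t ih =>
    rw [List.range_succ]
    simp only [List.map_append, List.map_cons, List.map_nil, List.sum_append, List.sum_cons,
      List.sum_nil, add_zero]
    rw [ih (by omega)]
    have hlt : l.toNat + t < xs.length := by omega
    rw [PySem.List.pyGetD_eq_getElem xs 0 (by omega) (by omega)]
    have he : (l + (t : Int)).toNat = l.toNat + t := by omega
    simp only [he]
    rw [show l.toNat + (t + 1) = (l.toNat + t) + 1 from rfl,
      List.sum_take_succ xs (l.toNat + t) hlt]
    ring

-- dropping the first hn terms of a guarded sum
lemma sum_map_if_ge (f : Nat → Int) (hn t : Nat) (h : hn ≤ t) :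
    ((List.range t).map (fun (j : Nat) => if hn ≤ j then f j else 0)).sum
      = ((List.range t).map f).sum - ((List.range hn).map f).sum := by
  induction t with
  | zero =>
    have h0 : hn = 0 := by omega
    simp [h0]
  | succ t ih =>
    rcases Nat.lt_or_ge t hn with hlt | hge
    · have ht : hn = t + 1 := by omega
      subst ht
      have hz : ∀ j ∈ List.range (t+1), (if t + 1 ≤ j then f j else 0) = 0 := by
        intro j hj; rw [List.mem_range] at hj; simp [Nat.not_le.mpr (by omega)]
      rw [List.map_congr_left hz]
      simp
    · rw [List.range_succ]
      simp only [List.map_append, List.map_cons, List.map_nil, List.sum_append, List.sum_cons,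
        List.sum_nil, add_zero]
      rw [ih hge, if_pos hge]
      ring

-- A's inner window loop as two range-sums
lemma innerA_sum (strategy prices : List Int) (lh l : Int) (t : Nat) :
    (PySem.List.pyRange l (l + (t : Int))).foldl (aInner strategy prices lh) (0, 0)
      = (((List.range t).map (fun (j : Nat) => PySem.List.pyGetD strategy (l + (j : Int)) 0 * PySem.List.pyGetD prices (l + (j : Int)) 0)).sum,
         ((List.range t).map (fun (j : Nat) => if lh ≤ l + (j : Int) then PySem.List.pyGetD prices (l + (j : Int)) 0 else 0)).sum) := by
  induction t with
  | zero => simp [PySem.List.pyRange_one_eq_nil (le_refl l)]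
  | succ t ih =>
    have hsplit : l + ((t : Nat) + 1 : Nat) = (l + (t : Int)) + 1 := by push_cast; ring
    rw [hsplit, PySem.List.pyRange_one_succ_right (by omega), List.foldl_append, ih,
      List.range_succ]
    simp only [List.foldl_cons, List.foldl_nil]
    unfold aInner
    by_cases hc : lh ≤ l + (t : Int) <;> simp [hc]

-- a fold of 'max best base' starting at base stays base (A's loop when windows are empty)
lemma foldl_max_const (r : List Int) (base : Int) (f : Int → Int)
    (h : ∀ l ∈ r, f l = base) : r.foldl (fun best l => max best (f l)) base = base := by
  induction r with
  | nil => rfl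
  | cons x xs ih =>
    simp only [List.foldl_cons, h x (by simp), max_self]
    exact ih (fun l hl => h l (by simp [hl]))

theorem maximumProfit_spec_aux : ∀ (prices strategy : List Int) (k : Int),
    Pre_maximumProfit prices strategy k →
    maximumProfit prices strategy k = maximumProfit_alt prices strategy k := by
  intro prices strategy k hpre
  unfold maximumProfit maximumProfit_alt
  set pairs := List.zip prices strategy with hpairs
  set vlist := pairs.map (fun ps => ps.1 * ps.2) with hvlist
  have hbuild := bStep_spec pairs [0] [0] 0 0
  by_cases htriv : k ≤ 0 ∨ (prices.length : Int) < k
  · -- no window modifies anything: both sides return base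
    rw [hbuild]
    simp only [if_pos htriv, zero_add]
    rw [foldl_base]
    simp only [zero_add]
    rcases htriv with hk | hk
    · -- k ≤ 0 : every inner range is empty, each step is max best base
      refine foldl_max_const _ _ _ (fun l _ => ?_)
      rw [show l + k = l + ((0:Nat) : Int) + k by simp]
      rw [PySem.List.pyRange_one_eq_nil (by omega)]
      simp
    · -- k > n : the outer range is empty
      rw [PySem.List.pyRange_one_eq_nil (by omega)]
      simp
  · -- main case: 0 < k ≤ n, and Pre_ gives strategy at least as long as prices
    have hk0 : 0 < k := by omega
    have hkn : k ≤ (prices.length : Int) := by omega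
    have hlen : prices.length ≤ strategy.length := by
      rcases hpre with h | h | h
      · omega
      · omega
      · exact h
    have hm : pairs.length = prices.length := by
      simp [hpairs, List.length_zip]; omega
    have hfst : pairs.map Prod.fst = prices := List.map_fst_zip hlen
    have hvlen : vlist.length = prices.length := by simp [hvlist, hm]
    rw [hbuild]
    simp only [if_neg (show ¬(k ≤ 0 ∨ (prices.length : Int) < k) by omega), zero_add]
    rw [foldl_base]
    simp only [zero_add]
    -- rewrite the two built prefix lists as maps of take-sums
    have hpa : (0 : Int) :: (List.range pairs.length).map (fun i => ((pairs.take (i+1)).map (fun ps => ps.1 * ps.2)).sum)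
        = (List.range (prices.length + 1)).map (fun i => (vlist.take i).sum) := by
      rw [← pref_list_eq vlist prices.length hvlen]
      refine congrArg₂ _ rfl ?_
      rw [hm]
      exact List.map_congr_left (fun i _ => by rw [hvlist, List.map_take])
    have hpp : (0 : Int) :: (List.range pairs.length).map (fun i => ((pairs.take (i+1)).map Prod.fst).sum)
        = (List.range (prices.length + 1)).map (fun i => (prices.take i).sum) := by
      rw [← pref_list_eq prices prices.length rfl]
      refine congrArg₂ _ rfl ?_
      rw [hm]
      exact List.map_congr_left (fun i _ => by rw [List.map_take, hfst])
    simp only [List.singleton_append] at hbuild ⊢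
    rw [hpa, hpp]
    -- both folds run over the same range; compare the step functions pointwise
    refine PySem.List.foldl_congr_mem _ _ _ _ (fun best l hl => ?_)
    rw [PySem.List.mem_pyRange_one] at hl
    obtain ⟨hl0, hlub⟩ := hl
    set h : Int := PySem.Int.floordiv k 2 with hh
    have hdiv : h = k / 2 := PySem.Int.floordiv_eq_ediv_of_pos (by omega)
    have hh0 : 0 ≤ h := by omega
    have hhk : h ≤ k := by omega
    -- A's inner loop value
    have hkcast : l + k = l + ((k.toNat : Nat) : Int) := by omega
    rw [hkcast, innerA_sum]
    -- pointwise: strategy[i]*prices[i] = vlist[i]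
    have hprod : ∀ j ∈ List.range k.toNat,
        PySem.List.pyGetD strategy (l + (j : Int)) 0 * PySem.List.pyGetD prices (l + (j : Int)) 0
          = PySem.List.pyGetD vlist (l + (j : Int)) 0 := by
      intro j hj
      rw [List.mem_range] at hj
      have hjlt : l + (j : Int) < (prices.length : Int) := by omega
      rw [PySem.List.pyGetD_eq_getElem strategy 0 (by omega) (by omega),
          PySem.List.pyGetD_eq_getElem prices 0 (by omega) (by omega),
          PySem.List.pyGetD_eq_getElem vlist 0 (by omega) (by rw [hvlen]; omega)]
      simp only [hvlist, List.getElem_map]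
      rw [show pairs[(l + (j:Int)).toNat]'(by rw [hm]; omega) = (prices[(l + (j:Int)).toNat]'(by omega), strategy[(l + (j:Int)).toNat]'(by omega)) from List.getElem_zip]
      ring
    have hguard : ∀ j ∈ List.range k.toNat,
        (if l + h ≤ l + (j : Int) then PySem.List.pyGetD prices (l + (j : Int)) 0 else 0)
          = (if h.toNat ≤ j then PySem.List.pyGetD prices (l + (j : Int)) 0 else 0) := by
      intro j _
      by_cases hc : h.toNat ≤ j
      · rw [if_pos (by omega), if_pos hc]
      · rw [if_neg (by omega), if_neg hc]
    rw [List.map_congr_left hprod, List.map_congr_left hguard]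
    rw [sum_map_getD vlist l k.toNat hl0 (by rw [hvlen]; omega)]
    rw [sum_map_if_ge _ h.toNat k.toNat (by omega)]
    rw [sum_map_getD prices l k.toNat hl0 (by omega),
        sum_map_getD prices l h.toNat hl0 (by omega)]
    -- B's four prefix lookups
    have hlook : ∀ (xs : List Int) (i : Int), 0 ≤ i → i ≤ (prices.length : Int) →
        PySem.List.pyGetD ((List.range (prices.length + 1)).map (fun i => (xs.take i).sum)) i 0
          = (xs.take i.toNat).sum := by
      intro xs i h0 h1
      rw [PySem.List.pyGetD_eq_getElem _ 0 h0 (by simp; omega)]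
      simp
    rw [hlook prices (l + ((k.toNat : Nat) : Int)) (by omega) (by omega),
        hlook prices (l + h) (by omega) (by omega),
        hlook vlist (l + ((k.toNat : Nat) : Int)) (by omega) (by omega),
        hlook vlist l (by omega) (by omega)]
    have e1 : (l + ((k.toNat : Nat) : Int)).toNat = l.toNat + k.toNat := by omega
    have e2 : (l + h).toNat = l.toNat + h.toNat := by omega
    rw [e1, e2]
    -- finally, max vs if-then-else
    rw [max_def]
    split <;> split <;> omega

-- ===== VERDICT (by name: the statement is the Claim_ definition above) =====
theorem maximumProfit_spec : Claim_equal_maximumProfit := by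
  intro prices strategy k _ hpre
  unfold Spec_maximumProfit
  exact maximumProfit_spec_aux prices strategy k hpre
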